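-- pv_equiv track=rewrite | github.com/pavel-vlasov/TUI-K6-Runner | k6/presenters.py | format_error_categories_table
-- ===== SOURCE A (Python) =====
-- def format_error_categories_table(categories: dict[str, int]) -> str:
--     rows = sorted(categories.items(), key=lambda pair: (-pair[1], pair[0]))
--     if not rows:
--         rows = [("-", 0)]
--
--     max_name = max(len("Category"), *(len(name) for name, _ in rows))
--     max_count = max(len("Count"), *(len(str(count)) for _, count in rows))
--
--     border = f"┌{'─' * (max_name + 2)}┬{'─' * (max_count + 2)}┐"
--     header = f"│ {'Category'.ljust(max_name)} │ {'Count'.rjust(max_count)} │"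
--     separator = f"├{'─' * (max_name + 2)}┼{'─' * (max_count + 2)}┤"
--     body = [f"│ {name.ljust(max_name)} │ {str(count).rjust(max_count)} │" for name, count in rows]
--     footer = f"└{'─' * (max_name + 2)}┴{'─' * (max_count + 2)}┘"
--
--     return "\n".join([border, header, separator, *body, footer])
-- ===== SOURCE B (Python) =====
-- def format_error_categories_table(categories: dict[str, int]) -> str:
--     rows = sorted(categories.items(), key=lambda pair: (-pair[1], pair[0])) or [("-", 0)]
--     n = len(rows)
--
--     def column(cells, pad):
--         w = max(len(c) for c in cells)
--         dash = '─' * (w + 2)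
--         padded = [' ' + pad(c, w) + ' ' for c in cells]
--         return [dash, padded[0], dash] + padded[1:] + [dash]
--
--     name_col = column(['Category'] + [name for name, _ in rows], str.ljust)
--     count_col = column(['Count'] + [str(count) for _, count in rows], str.rjust)
--     left = ['┌', '│', '├'] + ['│'] * n + ['└']
--     mid = ['┬', '│', '┼'] + ['│'] * n + ['┴']
--     right = ['┐', '│', '┤'] + ['│'] * n + ['┘']
--     return '\n'.join(
--         l + a + m + b + r for l, a, m, b, r in zip(left, name_col, mid, count_col, right)
--     )
-- ===== Notes on version B (the rewrite author's own statement) =====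
-- stated objective: alternative
-- what changed: A assembles the table row by row with per-row f-strings over two precomputed widths; B assembles it column by column: each column is rendered as a complete vertical block (dash rule, padded header cell, dash rule, padded body cells, dash rule), three frame-glyph columns supply the corners/junctions, and the lines are obtained by transposing the five columns with zip.
import Mathlib
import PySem

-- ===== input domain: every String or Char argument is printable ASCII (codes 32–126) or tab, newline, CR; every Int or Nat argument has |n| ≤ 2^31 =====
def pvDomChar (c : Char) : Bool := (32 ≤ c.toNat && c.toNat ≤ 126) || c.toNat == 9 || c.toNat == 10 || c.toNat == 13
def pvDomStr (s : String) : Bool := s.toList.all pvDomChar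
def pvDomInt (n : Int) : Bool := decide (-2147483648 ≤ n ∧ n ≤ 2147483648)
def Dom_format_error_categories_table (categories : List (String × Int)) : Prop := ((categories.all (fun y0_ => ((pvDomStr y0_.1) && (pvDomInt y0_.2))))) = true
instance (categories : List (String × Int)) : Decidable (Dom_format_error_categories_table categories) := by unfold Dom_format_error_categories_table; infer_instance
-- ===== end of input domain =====

-- B builds the table column by column (each column is a vertical block of dash/padded-cell
-- lines, plus three frame-glyph columns) and transposes with zip; objective: alternative.

-- ===== PORT A =====
-- str.ljust / str.rjust, ported by hand (exact: Nat subtraction gives 0 padding when already wide enough)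
def pyLjust (cs : List Char) (w : Nat) : List Char := cs ++ List.replicate (w - cs.length) ' '
def pyRjust (cs : List Char) (w : Nat) : List Char := List.replicate (w - cs.length) ' ' ++ cs

def format_error_categories_table (categories : List (String × Int)) : String :=
  -- rows = sorted(categories.items(), key=lambda pair: (-pair[1], pair[0]))
  let rows0 := PySem.List.sorted2 categories (fun p => -p.2) (fun p => p.1) false
  let rows := if rows0 = [] then [("-", (0 : Int))] else rows0
  -- max(len("Category"), *(len(name) for name, _ in rows))
  let max_name := (rows.map (fun p => p.1.toList.length)).foldl max ("Category".toList.length)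
  let max_count := (rows.map (fun p => (PySem.Int.toChars p.2).length)).foldl max ("Count".toList.length)
  -- f-strings ported by hand as List Char concatenations (exact: only literal pieces and the fields shown)
  let border := '┌' :: List.replicate (max_name + 2) '─' ++ '┬' :: List.replicate (max_count + 2) '─' ++ ['┐']
  let header := ['│', ' '] ++ pyLjust "Category".toList max_name ++ [' ', '│', ' '] ++ pyRjust "Count".toList max_count ++ [' ', '│']
  let separator := '├' :: List.replicate (max_name + 2) '─' ++ '┼' :: List.replicate (max_count + 2) '─' ++ ['┤']
  let body := rows.map (fun p => ['│', ' '] ++ pyLjust p.1.toList max_name ++ [' ', '│', ' '] ++ pyRjust (PySem.Int.toChars p.2) max_count ++ [' ', '│'])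
  let footer := '└' :: List.replicate (max_name + 2) '─' ++ '┴' :: List.replicate (max_count + 2) '─' ++ ['┘']
  String.mk (PySem.Chars.join ['\n'] ([border, header, separator] ++ body ++ [footer]))

-- ===== PORT B =====
-- column(cells, pad): width = max over the cells (nonempty: the header cell is always there),
-- then [dash, padded[0], dash] + padded[1:] + [dash]
def bColumn (cells : List (List Char)) (pad : List Char → Nat → List Char) : List (List Char) :=
  match cells with
  | [] => []  -- unreachable: the header cell is always present
  | c0 :: rest =>
    let w := (rest.map List.length).foldl max c0.length
    let dash := List.replicate (w + 2) '─'
    let padded := (c0 :: rest).map (fun c => ' ' :: pad c w ++ [' '])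
    [dash, padded.head!, dash] ++ padded.tail ++ [dash]

-- zip(left, name_col, mid, count_col, right) with l + a + m + b + r per line
def bZip5 : List Char → List (List Char) → List Char → List (List Char) → List Char → List (List Char)
  | l :: ls, a :: as_, m :: ms, b :: bs, r :: rs =>
      (l :: a ++ m :: b ++ [r]) :: bZip5 ls as_ ms bs rs
  | _, _, _, _, _ => []

def format_error_categories_table_alt (categories : List (String × Int)) : String :=
  let rows0 := PySem.List.sorted2 categories (fun p => -p.2) (fun p => p.1) false
  let rows := if rows0 = [] then [("-", (0 : Int))] else rows0
  let n := rows.length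
  let name_col := bColumn ("Category".toList :: rows.map (fun p => p.1.toList)) pyLjust
  let count_col := bColumn ("Count".toList :: rows.map (fun p => PySem.Int.toChars p.2)) pyRjust
  let left := ['┌', '│', '├'] ++ List.replicate n '│' ++ ['└']
  let mid := ['┬', '│', '┼'] ++ List.replicate n '│' ++ ['┴']
  let right := ['┐', '│', '┤'] ++ List.replicate n '│' ++ ['┘']
  String.mk (PySem.Chars.join ['\n'] (bZip5 left name_col mid count_col right))

-- ===== PRECONDITION & SPEC =====
def Spec_format_error_categories_table (categories : List (String × Int)) (out : String) : Prop := out = format_error_categories_table_alt categories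
instance (categories : List (String × Int)) (out : String) : Decidable (Spec_format_error_categories_table categories out) := by unfold Spec_format_error_categories_table; infer_instance

-- ===== CLAIM (what is proved, stated in full; the proofs are below) =====
def Claim_equal_format_error_categories_table : Prop := ∀ (categories : List (String × Int)), Dom_format_error_categories_table categories → Spec_format_error_categories_table categories (format_error_categories_table categories)

-- ===== LEMMAS AND PROOFS =====
-- the body part of the transposition: three '│' frame columns zipped with the two mapped cell columns
theorem bZip5_body {α : Type} (rows : List α) (f g : α → List Char)
    (xl xm xr : Char) (xa xb : List Char) :
    bZip5 (List.replicate rows.length '│' ++ [xl]) (rows.map f ++ [xa])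
          (List.replicate rows.length '│' ++ [xm]) (rows.map g ++ [xb])
          (List.replicate rows.length '│' ++ [xr])
      = rows.map (fun p => '│' :: f p ++ '│' :: g p ++ ['│']) ++ [xl :: xa ++ xm :: xb ++ [xr]] := by
  induction rows with
  | nil => simp [bZip5]
  | cons h t ih => simp [bZip5, List.replicate_succ, ih]

-- ===== VERDICT (by name: the statement is the Claim_ definition above) =====
theorem format_error_categories_table_spec : Claim_equal_format_error_categories_table := by
  intro c _
  unfold Spec_format_error_categories_table format_error_categories_table format_error_categories_table_alt
  generalize PySem.List.sorted2 c (fun p => -p.2) (fun p => p.1) false = rows0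
  generalize (if rows0 = [] then [(("-" : String), (0 : Int))] else rows0) = rows
  simp only [bColumn, List.map_cons, List.map_map, Function.comp_def, List.head!, List.tail,
    bZip5, List.cons_append, List.nil_append]
  rw [bZip5_body]
  simp [pyLjust, pyRjust]
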